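-- pv_equiv track=rewrite | github.com/sglee487/Coding-test | Programmers/코딩테스트 고득점 Kit/탐욕법(Greedy) 4. 구명보트(효율성 실패).py | solution
-- ===== SOURCE A (Python) =====
-- def solution(people, limit):
--     people.sort(reverse=True)
--     answer = 0
--     boat = []
--     while people:
--         for p in people:
--             if limit - sum(boat) >= p:
--                 boat.append(p)
--             if len(boat) == 2: break
--         for b in boat:
--             people.remove(b)
--         answer += 1
--         boat = []
--     return answer
-- ===== SOURCE B (Python) =====
-- def solution(people, limit):
--     ppl = sorted(people)
--     lo, hi = 0, len(ppl) - 1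
--     boats = 0
--     while lo <= hi:
--         if ppl[lo] + ppl[hi] <= limit:
--             lo += 1
--         hi -= 1
--         boats += 1
--     return boats
-- ===== Notes on version B (the rewrite author's own statement) =====
-- stated objective: alternative
-- what changed: Replaced A's boat-by-boat simulation (repeated rescans of the remaining list with sum(boat) and list.remove, pairing the heaviest with the heaviest fitting partner) by the classic two-pointer greedy on one ascending sort (pair heaviest with lightest if they fit); an exchange argument proves the boat counts are equal.
import Mathlib
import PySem

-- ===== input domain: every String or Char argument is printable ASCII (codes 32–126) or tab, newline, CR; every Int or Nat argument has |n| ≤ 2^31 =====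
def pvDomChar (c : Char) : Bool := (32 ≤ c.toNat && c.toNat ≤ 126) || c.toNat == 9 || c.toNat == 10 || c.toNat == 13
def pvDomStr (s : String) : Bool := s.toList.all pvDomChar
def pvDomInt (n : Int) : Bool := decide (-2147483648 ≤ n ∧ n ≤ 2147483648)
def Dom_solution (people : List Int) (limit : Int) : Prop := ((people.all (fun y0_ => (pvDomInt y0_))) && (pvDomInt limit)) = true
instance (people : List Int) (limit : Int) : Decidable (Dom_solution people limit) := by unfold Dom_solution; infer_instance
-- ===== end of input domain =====

-- B replaces A's quadratic heaviest-with-heaviest-fitting boat filling by the two-pointer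
-- heaviest-with-lightest greedy on one ascending sort (equal counts by an exchange argument).
-- Side effects differ: A sorts and then empties the caller's list; B leaves it untouched.
-- The equivalence proved here is about the return value only.

-- ===== PORT A =====
-- the inner 'for p in people' loop building one boat (break when the boat holds 2)
def pvFillBoat : List Int → Int → List Int → List Int
  | [], _, boat => boat
  | p :: rest, limit, boat =>
    let boat' := if limit - boat.sum ≥ p then boat ++ [p] else boat
    if boat'.length = 2 then boat' else pvFillBoat rest limit boat'

-- 'for b in boat: people.remove(b)'
def pvRemoveAll (people boat : List Int) : List Int :=
  boat.foldl (fun ps b => (PySem.List.remove? ps b).getD ps) people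

-- the outer 'while people' loop; fuel only makes the port total: inside Pre_solution each
-- iteration removes at least one person, so fuel = length is never exhausted
def pvALoop : Nat → List Int → Int → Int → Int
  | 0, _, _, answer => answer
  | fuel+1, people, limit, answer =>
    if people = [] then answer
    else pvALoop fuel (pvRemoveAll people (pvFillBoat people limit [])) limit (answer + 1)

def solution (people : List Int) (limit : Int) : Int :=
  let ppl := PySem.List.sorted people (fun x => x) true
  pvALoop ppl.length ppl limit 0

-- ===== PORT B =====
-- two-pointer loop of Source B; pyGetD's default only makes the port total (indices reached
-- from solution_alt always satisfy 0 ≤ lo ≤ hi < len)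
def pvBLoop (ppl : List Int) (limit : Int) (lo hi boats : Int) : Int :=
  if _h : lo ≤ hi then
    pvBLoop ppl limit
      (if PySem.List.pyGetD ppl lo 0 + PySem.List.pyGetD ppl hi 0 ≤ limit then lo + 1 else lo)
      (hi - 1) (boats + 1)
  else boats
termination_by (hi + 1 - lo).toNat
decreasing_by split <;> omega

def solution_alt (people : List Int) (limit : Int) : Int :=
  let ppl := PySem.List.sorted people (fun x => x) false
  pvBLoop ppl limit 0 ((ppl.length : Int) - 1) 0

-- ===== PRECONDITION & SPEC =====
-- Pre_ excludes exactly the inputs where some person is heavier than limit: that person is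
-- never boarded, so A's while loop runs forever (A returns on no such input).
def Pre_solution (people : List Int) (limit : Int) : Prop := ∀ p ∈ people, p ≤ limit
instance (people : List Int) (limit : Int) : Decidable (Pre_solution people limit) := by
  unfold Pre_solution; infer_instance
def pvWitness_solution : List Int × Int := ([70, 50, 80, 50], 100)

def Spec_solution (people : List Int) (limit : Int) (out : Int) : Prop := out = solution_alt people limit
instance (people : List Int) (limit : Int) (out : Int) : Decidable (Spec_solution people limit out) := by unfold Spec_solution; infer_instance

-- ===== CLAIM (what is proved, stated in full; the proofs are below) =====
def Claim_equal_solution : Prop := ∀ (people : List Int) (limit : Int), Dom_solution people limit → Pre_solution people limit → Spec_solution people limit (solution people limit)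

-- ===== LEMMAS AND PROOFS =====

-- descending-sorted
def SDesc (L : List Int) : Prop := L.Pairwise (fun a b => b ≤ a)

-- remove the first element ≤ t (A's partner choice: heaviest fitting)
def removeFirstLE (t : Int) : List Int → Option (List Int)
  | [] => none
  | a :: s => if a ≤ t then some s else (removeFirstLE t s).map (a :: ·)

theorem length_removeFirstLE {t : Int} : ∀ {L L' : List Int},
    removeFirstLE t L = some L' → L'.length + 1 = L.length := by
  intro L
  induction L with
  | nil => intro L' h; simp [removeFirstLE] at h
  | cons a s ih =>
    intro L' h
    by_cases ha : a ≤ t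
    · simp [removeFirstLE, ha] at h; subst h; rfl
    · simp [removeFirstLE, ha] at h
      obtain ⟨r, hr, hL'⟩ := h
      subst hL'; simp [← ih hr]

-- A's abstract count on a descending list
def cntA (limit : Int) : List Int → Nat
  | [] => 0
  | h :: r =>
    match hm : removeFirstLE (limit - h) r with
    | some r' => 1 + cntA limit r'
    | none => 1 + cntA limit r
termination_by L => L.length
decreasing_by
  all_goals first
    | (have h2 := length_removeFirstLE hm; simp only [List.length_cons]; omega)
    | (simp only [List.length_cons]; omega)

-- B's abstract count on a descending list (pair head with last if they fit)
def cntB (limit : Int) : List Int → Nat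
  | [] => 0
  | h :: r =>
    match r.getLast? with
    | some z => if h + z ≤ limit then 1 + cntB limit r.dropLast else 1 + cntB limit r
    | none => 1 + cntB limit r
termination_by L => L.length
decreasing_by
  all_goals simp only [List.length_cons, List.length_dropLast]
  all_goals omega

theorem removeFirstLE_cons_le {t a : Int} {s : List Int} (h : a ≤ t) :
    removeFirstLE t (a :: s) = some s := by simp [removeFirstLE, h]

theorem removeFirstLE_none {t : Int} : ∀ {L : List Int}, (∀ a ∈ L, ¬ a ≤ t) →
    removeFirstLE t L = none := by
  intro L
  induction L with
  | nil => intro; rfl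
  | cons a s ih =>
    intro h
    simp [removeFirstLE, h a (by simp), ih (fun b hb => h b (by simp [hb]))]

theorem removeFirstLE_append_skip {t : Int} : ∀ {p L : List Int}, (∀ a ∈ p, ¬ a ≤ t) →
    removeFirstLE t (p ++ L) = (removeFirstLE t L).map (p ++ ·) := by
  intro p
  induction p with
  | nil => intro L _; simp
  | cons a s ih =>
    intro L h
    have ha := h a (by simp)
    simp only [List.cons_append, removeFirstLE, ha,
      ih (fun b hb => h b (by simp [hb]))]
    cases removeFirstLE t L <;> simp

theorem exists_first_split (t : Int) : ∀ (L : List Int),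
    (∀ a ∈ L, ¬ a ≤ t) ∨ ∃ p x q, L = p ++ x :: q ∧ (∀ b ∈ p, ¬ b ≤ t) ∧ x ≤ t := by
  intro L
  induction L with
  | nil => left; simp
  | cons a s ih =>
    by_cases ha : a ≤ t
    · right; exact ⟨[], a, s, by simp, by simp, ha⟩
    · cases ih with
      | inl h =>
        left; intro b hb
        rcases List.mem_cons.mp hb with rfl | hb2
        exacts [ha, h b hb2]
      | inr h =>
        obtain ⟨p, x, q, hL, hp, hx⟩ := h
        right
        refine ⟨a :: p, x, q, by simp [hL], ?_, hx⟩
        intro b hb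
        rcases List.mem_cons.mp hb with rfl | hb2
        exacts [ha, hp b hb2]

-- unfolding lemmas for cntA / cntB
theorem cntA_nil (limit : Int) : cntA limit [] = 0 := by rw [cntA]

theorem cntA_cons (limit a : Int) (r : List Int) :
    cntA limit (a :: r) = 1 + cntA limit ((removeFirstLE (limit - a) r).getD r) := by
  rw [cntA]
  cases h : removeFirstLE (limit - a) r <;> rfl

theorem cntB_nil (limit : Int) : cntB limit [] = 0 := by rw [cntB]

theorem cntB_cons_nil (limit a : Int) : cntB limit [a] = 1 := by
  rw [cntB]; simp [cntB_nil]

theorem cntB_cons_some (limit a z : Int) (r : List Int) (h : r.getLast? = some z) :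
    cntB limit (a :: r) = if a + z ≤ limit then 1 + cntB limit r.dropLast else 1 + cntB limit r := by
  rw [cntB, h]

-- the inner for-loop with one person aboard: nobody fits → boat stays [hh]
theorem fill_none (limit hh : Int) : ∀ (r : List Int), (∀ a ∈ r, ¬ a ≤ limit - hh) →
    pvFillBoat r limit [hh] = [hh] := by
  intro r
  induction r with
  | nil => intro _; rfl
  | cons p rest ih =>
    intro h
    have hp : ¬ (limit - List.sum [hh] ≥ p) := by
      have := h p (by simp); simp at this ⊢; omega
    simp only [pvFillBoat, if_neg hp]
    exact ih (fun b hb => h b (List.mem_cons_of_mem p hb))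

-- the inner for-loop with one person aboard: x is the first fitting person → boat [hh, x]
theorem fill_some (limit hh x : Int) (q : List Int) (hx : x ≤ limit - hh) :
    ∀ (p : List Int), (∀ b ∈ p, ¬ b ≤ limit - hh) →
    pvFillBoat (p ++ x :: q) limit [hh] = [hh, x] := by
  intro p
  induction p with
  | nil =>
    intro _
    simp [pvFillBoat, hx]
  | cons b rest ih =>
    intro h
    have hb : ¬ (limit - List.sum [hh] ≥ b) := by
      have := h b (by simp); simp at this ⊢; omega
    simp only [List.cons_append, pvFillBoat, if_neg hb]
    exact ih (fun c hc => h c (List.mem_cons_of_mem b hc))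

theorem fillBoat_start (limit hh : Int) (r : List Int) (h : hh ≤ limit) :
    pvFillBoat (hh :: r) limit [] = pvFillBoat r limit [hh] := by
  simp [pvFillBoat, h]

theorem remove_append_notmem (x : Int) : ∀ (p q : List Int), (∀ b ∈ p, b ≠ x) →
    PySem.List.remove? (p ++ x :: q) x = some (p ++ q) := by
  intro p
  induction p with
  | nil => intro q _; simp
  | cons b rest ih =>
    intro q h
    rw [List.cons_append, PySem.List.remove?_cons_of_ne _ (h b (by simp)),
      ih q (fun c hc => h c (List.mem_cons_of_mem b hc))]
    simp

theorem removeAll_one (hh : Int) (r : List Int) : pvRemoveAll (hh :: r) [hh] = r := by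
  simp [pvRemoveAll]

theorem removeAll_two (hh x : Int) (p q : List Int) (h : ∀ b ∈ p, b ≠ x) :
    pvRemoveAll (hh :: (p ++ x :: q)) [hh, x] = p ++ q := by
  simp [pvRemoveAll, remove_append_notmem x p q h]

-- A's loop computes cntA
theorem pvALoop_eq (limit : Int) : ∀ (n : Nat) (L : List Int) (acc : Int), L.length ≤ n →
    SDesc L → (∀ a ∈ L, a ≤ limit) →
    pvALoop n L limit acc = acc + (cntA limit L : Int) := by
  intro n
  induction n with
  | zero =>
    intro L acc hlen _ _
    have : L = [] := List.length_eq_zero_iff.mp (Nat.le_zero.mp hlen)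
    subst this; simp [pvALoop, cntA_nil]
  | succ n ih =>
    intro L acc hlen hsd hle
    match L with
    | [] => simp [pvALoop, cntA_nil]
    | hh :: r =>
      have hhle : hh ≤ limit := hle hh (by simp)
      have hne : hh :: r ≠ [] := by simp
      rw [pvALoop, if_neg hne, fillBoat_start limit hh r hhle]
      rcases exists_first_split (limit - hh) r with hnone | ⟨p, x, q, hr, hp, hx⟩
      · rw [fill_none limit hh r hnone, removeAll_one,
          ih r (acc + 1) (by simpa using Nat.lt_succ_iff.mp (Nat.lt_of_lt_of_le (by simp) hlen)) hsd.tail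
            (fun a ha => hle a (List.mem_cons_of_mem hh ha)),
          cntA_cons, removeFirstLE_none hnone]
        simp; ring
      · subst hr
        have hpx : ∀ b ∈ p, b ≠ x := by
          intro b hb hbx; exact hp b hb (hbx ▸ hx)
        rw [fill_some limit hh x q hx p hp, removeAll_two hh x p q hpx]
        have hsub : List.Sublist (p ++ q) (hh :: (p ++ x :: q)) := by
          refine List.Sublist.cons _ ?_
          exact (List.sublist_cons_self x q).append_left p
        have hlen2 : (p ++ q).length ≤ n := by
          have : (hh :: (p ++ x :: q)).length ≤ n + 1 := hlen
          simp at this ⊢; omega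
        rw [ih (p ++ q) (acc + 1) hlen2 (hsd.sublist hsub)
            (fun a ha => hle a (hsub.mem ha)),
          cntA_cons, removeFirstLE_append_skip hp, removeFirstLE_cons_le hx]
        simp; ring

theorem cntA_cons_some {limit a : Int} {r R : List Int}
    (h : removeFirstLE (limit - a) r = some R) : cntA limit (a :: r) = 1 + cntA limit R := by
  rw [cntA_cons, h]; rfl

theorem cntA_cons_none {limit a : Int} {r : List Int}
    (h : removeFirstLE (limit - a) r = none) : cntA limit (a :: r) = 1 + cntA limit r := by
  rw [cntA_cons, h]; rfl

theorem cntA_singleton (limit a : Int) : cntA limit [a] = 1 := by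
  rw [cntA_cons_none rfl, cntA_nil]

theorem removeFirstLE_split {t : Int} (p : List Int) (x : Int) (q : List Int)
    (hp : ∀ b ∈ p, ¬ b ≤ t) (hx : x ≤ t) :
    removeFirstLE t (p ++ x :: q) = some (p ++ q) := by
  rw [removeFirstLE_append_skip hp, removeFirstLE_cons_le hx]; rfl

-- SDesc is stable under removing one middle element
theorem sdesc_drop_mid {u m : List Int} {x : Int} (h : SDesc (u ++ x :: m)) :
    SDesc (u ++ m) :=
  List.Pairwise.sublist ((List.sublist_cons_self x m).append_left u) h

theorem sdesc_rel {L1 L2 : List Int} {x : Int} (h : SDesc (L1 ++ x :: L2)) :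
    ∀ e ∈ L2, e ≤ x :=
  (List.pairwise_cons.mp (List.pairwise_append.mp h).2.1).1

-- exchange lemma: removing the heaviest fitting partner or the lightest person
-- leads to the same count
theorem exchange (limit : Int) : ∀ (n : Nat) (u m : List Int) (x y : Int),
    (u ++ x :: m ++ [y]).length ≤ n →
    SDesc (u ++ x :: m ++ [y]) →
    (∀ a ∈ u, x + a ≤ limit) → x + x ≤ limit →
    cntA limit (u ++ m ++ [y]) = cntA limit (u ++ x :: m) := by
  intro n
  induction n with
  | zero => intro u m x y hlen; simp at hlen
  | succ n ih =>
    intro u m x y hlen hsd hu hx2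
    match u with
    | [] =>
      -- head of the right list is x itself
      have hmx : ∀ e ∈ m ++ [y], e ≤ x := sdesc_rel (L1 := []) hsd
      match m with
      | [] =>
        show cntA limit [y] = cntA limit [x]
        rw [cntA_singleton, cntA_singleton]
      | m1 :: m' =>
        have hm1x : m1 ≤ x := hmx m1 (by simp)
        have hm1fit : m1 ≤ limit - x := by omega
        have hR : cntA limit (x :: m1 :: m') = 1 + cntA limit m' :=
          cntA_cons_some (removeFirstLE_cons_le hm1fit)
        match m' with
        | [] =>
          have hyfit : y ≤ limit - m1 := by
            have := hmx y (by simp); omega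
          show cntA limit (m1 :: [y]) = cntA limit (x :: [m1])
          rw [cntA_cons_some (removeFirstLE_cons_le hyfit), hR, cntA_nil]
        | m2 :: m'' =>
          have hm2fit : m2 ≤ limit - m1 := by
            have h1 : m2 ≤ x := hmx m2 (by simp)
            omega
          show cntA limit (m1 :: (m2 :: (m'' ++ [y]))) = cntA limit (x :: m1 :: m2 :: m'')
          rw [cntA_cons_some (removeFirstLE_cons_le hm2fit), hR]
          have hres := ih [] m'' m2 y (by simp at hlen ⊢; omega)
            (hsd.tail.tail)
            (by simp)
            (by have h1 : m2 ≤ x := hmx m2 (by simp); omega)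
          simpa using hres
    | h' :: u' =>
      have t'def : x ≤ limit - h' := by have := hu h' (by simp); omega
      have hall : ∀ a ∈ u' ++ x :: m ++ [y], a ≤ h' := (List.pairwise_cons.mp hsd).1
      have hyx : y ≤ x := by
        have h2 : SDesc (u' ++ (x :: (m ++ [y]))) := by
          simpa [List.append_assoc] using (List.pairwise_cons.mp hsd).2
        exact sdesc_rel (L1 := u') h2 y (by simp)
      rcases exists_first_split (limit - h') u' with hu'none | ⟨p, a, q, hu'eq, hp, ha⟩
      · -- nobody in u' fits with h'; x is h''s partner on the right
        have hR : removeFirstLE (limit - h') (u' ++ x :: m) = some (u' ++ m) :=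
          removeFirstLE_split u' x m hu'none t'def
        simp only [List.cons_append, List.append_assoc]
        rw [cntA_cons_some hR]
        rcases exists_first_split (limit - h') m with hmnone | ⟨p, m1, q, hmeq, hp2, hm1⟩
        · -- nobody in m fits either: y is h''s partner on the left
          have hy : y ≤ limit - h' := by omega
          have hskip : ∀ b ∈ u' ++ m, ¬ b ≤ limit - h' := by
            intro b hb
            rcases List.mem_append.mp hb with h1 | h1
            exacts [hu'none b h1, hmnone b h1]
          have hL : removeFirstLE (limit - h') (u' ++ (m ++ [y])) = some (u' ++ m) := by
            have := removeFirstLE_split (u' ++ m) y [] hskip hy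
            simpa [List.append_assoc] using this
          rw [cntA_cons_some hL]
        · -- m1 ∈ m is h''s partner on the left; exchange m1 against y deeper
          subst hmeq
          have hskip : ∀ b ∈ u' ++ p, ¬ b ≤ limit - h' := by
            intro b hb
            rcases List.mem_append.mp hb with h1 | h1
            exacts [hu'none b h1, hp2 b h1]
          have hL : removeFirstLE (limit - h') (u' ++ (p ++ (m1 :: (q ++ [y]))))
              = some (u' ++ (p ++ (q ++ [y]))) := by
            have := removeFirstLE_split (u' ++ p) m1 (q ++ [y]) hskip hm1
            simpa [List.append_assoc] using this
          simp only [List.cons_append, List.append_assoc]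
          rw [cntA_cons_some hL]
          have hres := ih (u' ++ p) q m1 y
            (by simp at hlen ⊢; omega)
            (by
              have h1 : SDesc (u' ++ x :: (p ++ m1 :: (q ++ [y]))) := by
                simpa [List.append_assoc, List.cons_append] using (List.pairwise_cons.mp hsd).2
              have h2 := sdesc_drop_mid (u := u') (x := x) (m := p ++ m1 :: (q ++ [y])) h1
              simpa [List.append_assoc, List.cons_append] using h2)
            (by
              intro b hb
              have hbh : b ≤ h' := hall b (by
                rcases List.mem_append.mp hb with h1 | h1 <;> simp [h1])
              omega)
            (by
              have : m1 ≤ h' := hall m1 (by simp)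
              omega)
          have hres' : cntA limit (u' ++ (p ++ (q ++ [y])))
              = cntA limit (u' ++ (p ++ m1 :: q)) := by
            simpa [List.append_assoc] using hres
          rw [hres']
      · -- a ∈ u' fits with h' on both sides: same partner, recurse
        subst hu'eq
        simp only [List.cons_append, List.append_assoc]
        have hR : removeFirstLE (limit - h') (p ++ (a :: (q ++ x :: m)))
            = some (p ++ (q ++ x :: m)) := by
          have := removeFirstLE_split p a (q ++ x :: m) hp ha
          simpa [List.append_assoc] using this
        have hL : removeFirstLE (limit - h') (p ++ (a :: (q ++ (m ++ [y]))))
            = some (p ++ (q ++ (m ++ [y]))) := by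
          have := removeFirstLE_split p a (q ++ m ++ [y]) hp ha
          simpa [List.append_assoc] using this
        rw [cntA_cons_some hL, cntA_cons_some hR]
        have hres := ih (p ++ q) m x y
          (by simp at hlen ⊢; omega)
          (by
            have h2 : SDesc (p ++ (q ++ x :: m ++ [y])) :=
              sdesc_drop_mid (u := p) (x := a) (by simpa [List.append_assoc] using (List.pairwise_cons.mp hsd).2)
            simpa [List.append_assoc] using h2)
          (fun b hb => hu b (by
            rcases List.mem_append.mp hb with h1 | h1 <;> simp [h1]))
          hx2
        have hres' : cntA limit (p ++ (q ++ (m ++ [y])))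
            = cntA limit (p ++ (q ++ x :: m)) := by
          simpa [List.append_assoc] using hres
        rw [hres']

-- main combinatorial theorem: the two greedies agree on descending lists
theorem cntA_eq_cntB (limit : Int) : ∀ (n : Nat) (L : List Int), L.length ≤ n →
    SDesc L → cntA limit L = cntB limit L := by
  intro n
  induction n with
  | zero =>
    intro L hlen _
    have : L = [] := List.length_eq_zero_iff.mp (Nat.le_zero.mp hlen)
    subst this; rw [cntA_nil, cntB_nil]
  | succ n ih =>
    intro L hlen hsd
    match L with
    | [] => rw [cntA_nil, cntB_nil]
    | h :: r =>
      have htail : ∀ a ∈ r, a ≤ h := (List.pairwise_cons.mp hsd).1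
      cases hr : r.getLast? with
      | none =>
        have : r = [] := List.getLast?_eq_none_iff.mp hr
        subst this
        rw [cntA_cons_none (by rfl), cntA_nil, cntB_cons_nil]
      | some y =>
        obtain ⟨r₀, hr₀⟩ := List.getLast?_eq_some_iff.mp hr
        have hymin : ∀ a ∈ r, y ≤ a := by
          have h1 := hsd.tail
          rw [hr₀] at h1
          intro a haR
          rw [hr₀] at haR
          rcases List.mem_append.mp haR with h2 | h2
          · exact (List.pairwise_append.mp h1).2.2 a h2 y (by simp)
          · simp at h2; omega
        by_cases hy : h + y ≤ limit
        · rw [cntB_cons_some limit h y r hr, if_pos hy, hr₀, List.dropLast_concat]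
          rcases exists_first_split (limit - h) r with hnone | ⟨p, x, q, hreq, hp, hxfit⟩
          · exact absurd hy (by have := hnone y (by rw [hr₀]; simp); omega)
          · have hxh : x ≤ h := htail x (by rw [hreq]; simp)
            have hsr : SDesc r := (List.pairwise_cons.mp hsd).2
            rw [hreq] at hr₀ hsr
            rw [cntA_cons_some (by rw [← hr₀]; exact removeFirstLE_split p x q hp hxfit)]
            cases q using List.reverseRecOn with
            | nil =>
              -- x is the last element: the two greedies pick the same partner
              have hpr : p = r₀ := by
                have := congrArg List.dropLast hr₀
                simpa using this
              have hcA : p ++ ([] : List Int) = r₀ := by simp [hpr]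
              have hsd₀ : SDesc r₀ := by
                have h2 := sdesc_drop_mid (u := p) (m := ([] : List Int)) (x := x)
                  (by simpa using hsr)
                rw [hcA] at h2; exact h2
              rw [hcA, ih r₀
                (by
                  have e1 := congrArg List.length hreq
                  have e2 := congrArg List.length hpr
                  simp at hlen e1 e2 ⊢; omega)
                hsd₀]
            | append_singleton q₀ y' =>
              have hr₀' : (p ++ x :: q₀) ++ [y'] = r₀ ++ [y] := by
                simpa [List.append_assoc] using hr₀
              obtain ⟨hpr, hyy⟩ := List.append_inj' hr₀' rfl
              have hy' : y' = y := by simpa using hyy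
              rw [hy'] at hsr
              have hexch := exchange limit r.length p q₀ x y
                (by rw [hreq]; simp)
                (by simpa [List.append_assoc, List.cons_append] using hsr)
                (by
                  intro b hb
                  have hbh : b ≤ h := htail b (by rw [hreq]; simp [hb])
                  omega)
                (by omega)
              have hstep : cntA limit (p ++ (q₀ ++ [y])) = cntA limit (p ++ x :: q₀) := by
                simpa [List.append_assoc] using hexch
              rw [hy', hstep, hpr]
              exact congrArg (1 + ·) (ih r₀
                (by
                  have e1 := congrArg List.length hreq
                  have e2 := congrArg List.length hpr
                  simp at hlen e1 e2 ⊢; omega)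
                (by
                  rw [← hpr]
                  have h2 := sdesc_drop_mid (u := p ++ x :: q₀) (m := ([] : List Int)) (x := y)
                    (by simpa [List.append_assoc, List.cons_append] using hsr)
                  simpa using h2))
        · -- head rides alone in both greedies
          have hnone : removeFirstLE (limit - h) r = none := by
            apply removeFirstLE_none
            intro a haR
            have := hymin a haR
            omega
          rw [cntA_cons_none hnone, cntB_cons_some limit h y r hr, if_neg hy]
          exact congrArg (1 + ·) (ih r (by simp at hlen ⊢; omega) hsd.tail)

-- segment ppl[lo..hi]
def seg (ppl : List Int) (lo hi : Int) : List Int :=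
  (ppl.drop lo.toNat).take (hi + 1 - lo).toNat

theorem seg_nil (ppl : List Int) {lo hi : Int} (h : hi < lo) : seg ppl lo hi = [] := by
  have : (hi + 1 - lo).toNat = 0 := by omega
  simp [seg, this]

theorem seg_cons (ppl : List Int) {lo hi : Int} (h0 : 0 ≤ lo) (h1 : lo ≤ hi)
    (h2 : hi < (ppl.length : Int)) :
    seg ppl lo hi = ppl[lo.toNat]'(by omega) :: seg ppl (lo + 1) hi := by
  have hlt : lo.toNat < ppl.length := by omega
  have hdrop : ppl.drop lo.toNat = ppl[lo.toNat] :: ppl.drop (lo.toNat + 1) :=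
    (List.getElem_cons_drop hlt).symm
  have ht : (hi + 1 - lo).toNat = (hi + 1 - (lo + 1)).toNat + 1 := by omega
  have ht2 : (lo + 1).toNat = lo.toNat + 1 := by omega
  rw [seg, hdrop, ht, List.take_succ_cons, seg, ht2]

theorem seg_snoc (ppl : List Int) : ∀ (d : Nat) (lo hi : Int) (_h0 : 0 ≤ lo) (_h1 : lo ≤ hi)
    (_h2 : hi < (ppl.length : Int)) (_hd : (hi - lo).toNat ≤ d),
    seg ppl lo hi = seg ppl lo (hi - 1) ++ [ppl[hi.toNat]'(by omega)] := by
  intro d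
  induction d with
  | zero =>
    intro lo hi h0 h1 h2 hd
    have : lo = hi := by omega
    subst this
    rw [seg_cons ppl h0 h1 h2, seg_nil ppl (by omega), seg_nil ppl (by omega)]
    simp
  | succ d ih =>
    intro lo hi h0 h1 h2 hd
    by_cases hlh : lo = hi
    · subst hlh
      rw [seg_cons ppl h0 h1 h2, seg_nil ppl (by omega), seg_nil ppl (by omega)]; simp
    · have h1' : lo + 1 ≤ hi := by omega
      rw [seg_cons ppl h0 h1 h2, ih (lo + 1) hi (by omega) h1' h2 (by omega),
        seg_cons ppl h0 (by omega) (by omega)]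
      simp

-- B's loop computes cntB of the reversed segment
theorem pvBLoop_eq (ppl : List Int) (limit : Int) : ∀ (k : Nat) (lo hi boats : Int),
    0 ≤ lo → hi < (ppl.length : Int) → (hi + 1 - lo).toNat ≤ k →
    pvBLoop ppl limit lo hi boats = boats + (cntB limit (seg ppl lo hi).reverse : Int) := by
  intro k
  induction k with
  | zero =>
    intro lo hi boats h0 h2 hk
    have hlt : hi < lo := by omega
    rw [pvBLoop, dif_neg (by omega), seg_nil ppl hlt]
    simp [cntB_nil]
  | succ k ih =>
    intro lo hi boats h0 h2 hk
    by_cases hle : lo ≤ hi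
    · have hlo : PySem.List.pyGetD ppl lo 0 = ppl[lo.toNat]'(by omega) :=
        PySem.List.pyGetD_eq_getElem ppl 0 h0 (by omega)
      have hhi : PySem.List.pyGetD ppl hi 0 = ppl[hi.toNat]'(by omega) :=
        PySem.List.pyGetD_eq_getElem ppl 0 (by omega) h2
      rw [pvBLoop, dif_pos hle, hlo, hhi]
      by_cases heq : lo = hi
      · -- single element left
        subst heq
        have hseg : seg ppl lo lo = [ppl[lo.toNat]'(by omega)] := by
          rw [seg_cons ppl h0 le_rfl h2, seg_nil ppl (by omega)]
        have hnext : ∀ lo' boats', lo ≤ lo' → pvBLoop ppl limit lo' (lo - 1) boats' = boats' := by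
          intro lo' boats' hlo'
          rw [pvBLoop, dif_neg (by omega)]
        rw [hseg]
        split_ifs with hc
        · rw [hnext (lo + 1) (boats + 1) (by omega)]; simp [cntB_cons_nil]
        · rw [hnext lo (boats + 1) le_rfl]; simp [cntB_cons_nil]
      · -- lo < hi
        have hlh : lo < hi := by omega
        have hsnoc := seg_snoc ppl (hi - lo).toNat lo hi h0 hle h2 le_rfl
        have hcons := seg_cons ppl h0 (by omega : lo ≤ hi - 1) (by omega : hi - 1 < (ppl.length : Int))
        have hrev : (seg ppl lo hi).reverse
            = ppl[hi.toNat]'(by omega) :: (seg ppl lo (hi - 1)).reverse := by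
          rw [hsnoc]; simp
        have hlast : (seg ppl lo (hi - 1)).reverse.getLast? = some (ppl[lo.toNat]'(by omega)) := by
          rw [List.getLast?_reverse, hcons]; rfl
        have hdrop : (seg ppl lo (hi - 1)).reverse.dropLast = (seg ppl (lo + 1) (hi - 1)).reverse := by
          rw [hcons]; simp [List.reverse_cons]
        rw [hrev, cntB_cons_some limit _ _ _ hlast]
        split_ifs with hc1 hc2
        · rw [hdrop, ih (lo + 1) (hi - 1) (boats + 1) (by omega) (by omega) (by omega)]
          push_cast; ring
        · exact (hc2 (by omega)).elim
        · exact (hc1 (by omega)).elim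
        · rw [ih lo (hi - 1) (boats + 1) h0 (by omega) (by omega)]
          push_cast; ring
    · rw [pvBLoop, dif_neg hle, seg_nil ppl (by omega)]
      simp [cntB_nil]

-- ===== VERDICT (by name: the statement is the Claim_ definition above) =====
theorem solution_spec : Claim_equal_solution := by
  intro people limit _hdom hpre
  show pvALoop (PySem.List.sorted people (fun x => x) true).length
      (PySem.List.sorted people (fun x => x) true) limit 0
    = pvBLoop (PySem.List.sorted people (fun x => x) false) limit 0
      (((PySem.List.sorted people (fun x => x) false).length : Int) - 1) 0
  set asc := PySem.List.sorted people (fun x => x) false with hasc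
  set desc := PySem.List.sorted people (fun x => x) true with hdesc
  have hdescP : desc.Pairwise (fun a b : Int => b ≤ a) :=
    PySem.List.sorted_pairwise_rev people (fun x => x)
  have hascP : asc.Pairwise (fun a b : Int => a ≤ b) :=
    PySem.List.sorted_pairwise people (fun x => x)
  have heq : desc = asc.reverse := by
    have hrevP : asc.reverse.Pairwise (fun a b : Int => b ≤ a) := by
      rw [List.pairwise_reverse]; exact hascP
    have hperm : desc.Perm asc.reverse :=
      ((PySem.List.sorted_perm people (fun x => x) true).trans
        (PySem.List.sorted_perm people (fun x => x) false).symm).trans asc.reverse_perm.symm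
    exact List.Perm.eq_of_pairwise (fun a b _ _ h1 h2 => le_antisymm h2 h1) hdescP hrevP hperm
  have hall : ∀ a ∈ desc, a ≤ limit := fun a ha =>
    hpre a ((PySem.List.mem_sorted people (fun x => x) true a).mp ha)
  have hseg : seg asc 0 ((asc.length : Int) - 1) = asc := by
    rw [seg, show (((asc.length : Int) - 1) + 1 - 0).toNat = asc.length by omega]
    simp
  rw [pvALoop_eq limit desc.length desc 0 le_rfl hdescP hall,
    pvBLoop_eq asc limit asc.length 0 ((asc.length : Int) - 1) 0 le_rfl (by omega) (by omega),
    hseg, ← heq, cntA_eq_cntB limit desc.length desc le_rfl hdescP]
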